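-- pv_equiv track=rewrite | github.com/benczech212/led_controller | button controller/effects.py | wheel
-- ===== SOURCE A (Python) =====
-- def wheel(pos):
--     pos %= 255
--     if pos < 0:
--         while pos < 0:
--             pos += 256
--     if pos < 85:
--         return int(255 - pos * 3), int(pos * 3), 0
--     if pos < 170:
--         pos -= 85
--         return 0, int(255 - pos * 3), int(pos * 3)
--     pos -= 170
--     return int(pos * 3), 0, int(255 - (pos * 3))
-- ===== SOURCE B (Python) =====
-- def wheel(pos):
--     pos %= 255
--     region, r = divmod(pos, 85)
--     t = (int(255 - r * 3), int(r * 3), int(0))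
--     k = -int(region) % 3
--     return t[k:] + t[:k]
-- ===== Notes on version B (the rewrite author's own statement) =====
-- stated objective: alternative
-- what changed: B replaces A's three-way if-chain (each branch with its own subtraction and tuple) by one divmod(pos, 85) that yields a single base triple (255-3r, 3r, 0) returned cyclically rotated by the region index via tuple slicing.
import Mathlib
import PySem

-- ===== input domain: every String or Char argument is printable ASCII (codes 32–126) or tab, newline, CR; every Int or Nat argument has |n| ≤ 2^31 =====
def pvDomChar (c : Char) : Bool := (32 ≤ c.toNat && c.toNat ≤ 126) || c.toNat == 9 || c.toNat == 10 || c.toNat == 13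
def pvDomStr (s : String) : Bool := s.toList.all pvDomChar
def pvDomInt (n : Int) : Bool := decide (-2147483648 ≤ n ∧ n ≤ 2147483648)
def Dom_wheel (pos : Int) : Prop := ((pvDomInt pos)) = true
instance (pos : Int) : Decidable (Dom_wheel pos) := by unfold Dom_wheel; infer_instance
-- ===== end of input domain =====

-- B replaces A's three-way branch chain by one divmod(pos, 85) and a cyclic rotation of the
-- base triple (255-3r, 3r, 0); same values, different decomposition (objective: alternative).
-- int() on Python ints is the identity, so the per-channel int() casts are identities here.

-- ===== PORT A =====
-- the `while pos < 0: pos += 256` loop of A, ported literally (dead for int inputs, since pos %= 255 is nonnegative)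
def wheelFix (p : Int) : Int :=
  if p < 0 then wheelFix (p + 256) else p
termination_by (-p).toNat
decreasing_by omega

def wheel (pos : Int) : Int × Int × Int :=
  let p0 := PySem.Int.mod pos 255
  let p := if p0 < 0 then wheelFix p0 else p0
  if p < 85 then (255 - p * 3, p * 3, 0)
  else if p < 170 then
    let p1 := p - 85
    (0, 255 - p1 * 3, p1 * 3)
  else
    let p2 := p - 170
    (p2 * 3, 0, 255 - p2 * 3)

-- ===== PORT B =====
-- t[k:] + t[:k] on a 3-tuple, k ∈ {0,1,2}: cyclic left rotation by k
def rotTriple (t : Int × Int × Int) (k : Int) : Int × Int × Int :=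
  if k = 1 then (t.2.1, t.2.2, t.1)
  else if k = 2 then (t.2.2, t.1, t.2.1)
  else t

def wheel_alt (pos : Int) : Int × Int × Int :=
  let p := PySem.Int.mod pos 255
  let region := PySem.Int.floordiv p 85
  let r := PySem.Int.mod p 85
  let t : Int × Int × Int := (255 - r * 3, r * 3, 0)
  let k := PySem.Int.mod (-region) 3
  rotTriple t k

-- ===== PRECONDITION & SPEC =====
def Spec_wheel (pos : Int) (out : Int × Int × Int) : Prop := out = wheel_alt pos
instance (pos : Int) (out : Int × Int × Int) : Decidable (Spec_wheel pos out) := by unfold Spec_wheel; infer_instance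

-- ===== CLAIM (what is proved, stated in full; the proofs are below) =====
def Claim_equal_wheel : Prop := ∀ (pos : Int), Dom_wheel pos → Spec_wheel pos (wheel pos)

-- ===== LEMMAS AND PROOFS =====
set_option maxHeartbeats 2000000 in
theorem wheel_eq_alt (pos : Int) : wheel pos = wheel_alt pos := by
  have h255 : (0:Int) < 255 := by norm_num
  have hm : PySem.Int.mod pos 255 = pos % 255 := PySem.Int.mod_eq_emod_of_pos h255
  have hlo : 0 ≤ PySem.Int.mod pos 255 := by rw [hm]; exact Int.emod_nonneg _ (by norm_num)
  have hhi : PySem.Int.mod pos 255 < 255 := by rw [hm]; exact Int.emod_lt_of_pos _ h255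
  unfold wheel wheel_alt
  generalize PySem.Int.mod pos 255 = p at hlo hhi ⊢
  interval_cases p <;> decide

-- ===== VERDICT (by name: the statement is the Claim_ definition above) =====
theorem wheel_spec : Claim_equal_wheel := by
  intro pos _
  unfold Spec_wheel
  exact wheel_eq_alt pos
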